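-- pv_equiv track=rewrite | github.com/evdanil/cn-tool | utils/api.py | selective_url_encode
-- ===== SOURCE A (Python) =====
-- def selective_url_encode(pattern: str) -> str:
--     # Characters that need to be URL-encoded
--     chars_to_encode = {"%", ";", "/", "?", ":", "@", "&", "=", "+", "$", ",", " "}
--     encoded_pattern = ""
--     for char in pattern:
--         if char in chars_to_encode:
--             encoded_pattern += f"%{ord(char):02X}"  # URL-encode the character
--         else:
--             encoded_pattern += char  # Leave the character as-is
--     return encoded_pattern
-- ===== SOURCE B (Python) =====
-- def selective_url_encode(pattern: str) -> str:
--     # Staged whole-string passes: one str.replace per special character,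
--     # with '%' replaced first so the percent signs introduced by the
--     # encoding itself are never re-encoded by later passes (the encoded
--     # forms contain only '%', digits and uppercase letters, none of which
--     # is a later special character).
--     for c in "%;/?:@&=+$, ":
--         pattern = pattern.replace(c, "%{:02X}".format(ord(c)))
--     return pattern
-- ===== Notes on version B (the rewrite author's own statement) =====
-- stated objective: alternative
-- what changed: replaces the single character-loop with an encode/keep branch and string accumulator by 12 staged whole-string str.replace passes, one per special character, ordered so '%' is handled first and passes never interfere
import Mathlib
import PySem

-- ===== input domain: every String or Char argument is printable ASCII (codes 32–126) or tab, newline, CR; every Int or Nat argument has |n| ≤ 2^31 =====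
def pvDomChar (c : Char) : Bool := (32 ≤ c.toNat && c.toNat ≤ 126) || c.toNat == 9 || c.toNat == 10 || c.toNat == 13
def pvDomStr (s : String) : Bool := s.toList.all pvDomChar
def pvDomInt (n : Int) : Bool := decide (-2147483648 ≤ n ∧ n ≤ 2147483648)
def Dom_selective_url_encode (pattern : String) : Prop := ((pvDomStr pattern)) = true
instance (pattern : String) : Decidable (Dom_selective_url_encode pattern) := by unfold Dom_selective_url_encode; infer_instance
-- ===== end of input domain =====

-- B replaces A's single accumulator loop (encode/keep branch per char) by 12 staged
-- whole-string replace passes, one per special character, '%' first (objective: alternative).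

-- f"{n:02X}" for 0 ≤ n < 256: two uppercase hex digits
def hexDigit (n : Nat) : Char := if n < 10 then Char.ofNat (48 + n) else Char.ofNat (55 + n)
def hex02X (n : Nat) : List Char := [hexDigit (n / 16), hexDigit (n % 16)]

-- ===== PORT A =====
def chars_to_encode : PySem.Set Char :=
  PySem.Set.ofList ['%', ';', '/', '?', ':', '@', '&', '=', '+', '$', ',', ' ']

def selective_url_encode (pattern : String) : String :=
  String.ofList (pattern.toList.foldl (fun acc c =>
    if PySem.Set.contains chars_to_encode c then acc ++ '%' :: hex02X c.toNat
    else acc ++ [c]) [])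

-- ===== PORT B =====
-- str.replace with a SINGLE-character needle: exact (no overlapping-match subtleties)
def replChar (s : Char) (r : List Char) : List Char → List Char
  | [] => []
  | c :: t => (if c == s then r else [c]) ++ replChar s r t

def selective_url_encode_alt (pattern : String) : String :=
  String.ofList ("%;/?:@&=+$, ".toList.foldl
    (fun l c => replChar c ('%' :: hex02X c.toNat) l) pattern.toList)

-- ===== PRECONDITION & SPEC =====
def Spec_selective_url_encode (pattern : String) (out : String) : Prop := out = selective_url_encode_alt pattern
instance (pattern : String) (out : String) : Decidable (Spec_selective_url_encode pattern out) := by unfold Spec_selective_url_encode; infer_instance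

-- ===== CLAIM (what is proved, stated in full; the proofs are below) =====
def Claim_equal_selective_url_encode : Prop := ∀ (pattern : String), Dom_selective_url_encode pattern → Spec_selective_url_encode pattern (selective_url_encode pattern)

-- ===== LEMMAS AND PROOFS =====

-- composition of the 12 passes, as B's fold
def passes (l : List Char) : List Char :=
  "%;/?:@&=+$, ".toList.foldl (fun l c => replChar c ('%' :: hex02X c.toNat) l) l

-- A's per-character step
def aStep (c : Char) : List Char :=
  if PySem.Set.contains chars_to_encode c then '%' :: hex02X c.toNat else [c]

lemma repl_append (s : Char) (r xs ys : List Char) :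
    replChar s r (xs ++ ys) = replChar s r xs ++ replChar s r ys := by
  induction xs with
  | nil => rfl
  | cons c t ih => simp [replChar, ih]

lemma foldl_repl_append (ps : List Char) (xs ys : List Char) :
    ps.foldl (fun l c => replChar c ('%' :: hex02X c.toNat) l) (xs ++ ys)
      = ps.foldl (fun l c => replChar c ('%' :: hex02X c.toNat) l) xs
        ++ ps.foldl (fun l c => replChar c ('%' :: hex02X c.toNat) l) ys := by
  induction ps generalizing xs ys with
  | nil => rfl
  | cons p t ih => simp only [List.foldl_cons, repl_append, ih]

lemma passes_append (xs ys : List Char) :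
    passes (xs ++ ys) = passes xs ++ passes ys := foldl_repl_append _ xs ys

lemma foldl_repl_untouched (ps : List Char) (c : Char) (h : c ∉ ps) :
    ps.foldl (fun l c => replChar c ('%' :: hex02X c.toNat) l) [c] = [c] := by
  induction ps with
  | nil => rfl
  | cons p t ih =>
    simp only [List.mem_cons, not_or] at h
    simp only [List.foldl_cons, replChar]
    rw [if_neg (by simpa using h.1)]
    simpa [replChar] using ih h.2

lemma passes_single (c : Char) : passes [c] = aStep c := by
  by_cases h : c ∈ ['%', ';', '/', '?', ':', '@', '&', '=', '+', '$', ',', ' ']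
  · simp only [List.mem_cons, List.not_mem_nil, or_false] at h
    rcases h with h | h | h | h | h | h | h | h | h | h | h | h <;> subst h <;> decide
  · have hs : aStep c = [c] := by
      simp only [List.mem_cons, List.not_mem_nil, or_false, not_or] at h
      obtain ⟨h1, h2, h3, h4, h5, h6, h7, h8, h9, h10, h11, h12⟩ := h
      simp [aStep, chars_to_encode, PySem.Set.contains_eq_listContains, PySem.Set.mem_ofList,
        h1, h2, h3, h4, h5, h6, h7, h8, h9, h10, h11, h12]
    rw [hs]
    exact foldl_repl_untouched _ c (by simpa using h)

lemma passes_eq_flatMap (l : List Char) : passes l = l.flatMap aStep := by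
  induction l with
  | nil => rfl
  | cons c t ih =>
    have : (c :: t) = [c] ++ t := rfl
    rw [this, passes_append, passes_single, ih]
    simp [aStep]

lemma a_loop (l acc : List Char) :
    l.foldl (fun acc c =>
      if PySem.Set.contains chars_to_encode c then acc ++ '%' :: hex02X c.toNat
      else acc ++ [c]) acc = acc ++ l.flatMap aStep := by
  induction l generalizing acc with
  | nil => simp
  | cons c t ih =>
    simp only [List.foldl_cons, List.flatMap_cons]
    rw [ih]
    unfold aStep
    split <;> simp

-- ===== VERDICT (by name: the statement is the Claim_ definition above) =====
theorem selective_url_encode_spec : Claim_equal_selective_url_encode := by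
  intro pattern _
  unfold Spec_selective_url_encode selective_url_encode selective_url_encode_alt
  rw [a_loop]
  have := passes_eq_flatMap pattern.toList
  unfold passes at this
  rw [this]
  simp
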